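-- pv_equiv track=rewrite | github.com/Gonzalomallin/Gonzalo-del-Puerto | Clase 7/Ejercicio_8.py | obtener_numero_menor
-- ===== SOURCE A (Python) =====
-- def obtener_numero_menor(entrada_lista):
--     menor = entrada_lista[0]
--     contador = 0
--
--     for n in entrada_lista:
--         if n < menor:
--             menor = n
--
--
--     for n in entrada_lista:
--         if n == menor:
--             contador += 1
--
--     return [menor, contador]
-- ===== SOURCE B (Python) =====
-- def obtener_numero_menor(entrada_lista):
--     menor = entrada_lista[0]
--     contador = 0
--     for n in entrada_lista:
--         if n < menor:
--             menor = n
--             contador = 1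
--         elif n == menor:
--             contador += 1
--     return [menor, contador]
-- ===== Notes on version B (the rewrite author's own statement) =====
-- stated objective: alternative
-- what changed: Replaces A's two sequential scans (one to find the minimum, one to count its occurrences) with a single pass maintaining (minimum, count) together, resetting the count to 1 when a new minimum appears.
import Mathlib
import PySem

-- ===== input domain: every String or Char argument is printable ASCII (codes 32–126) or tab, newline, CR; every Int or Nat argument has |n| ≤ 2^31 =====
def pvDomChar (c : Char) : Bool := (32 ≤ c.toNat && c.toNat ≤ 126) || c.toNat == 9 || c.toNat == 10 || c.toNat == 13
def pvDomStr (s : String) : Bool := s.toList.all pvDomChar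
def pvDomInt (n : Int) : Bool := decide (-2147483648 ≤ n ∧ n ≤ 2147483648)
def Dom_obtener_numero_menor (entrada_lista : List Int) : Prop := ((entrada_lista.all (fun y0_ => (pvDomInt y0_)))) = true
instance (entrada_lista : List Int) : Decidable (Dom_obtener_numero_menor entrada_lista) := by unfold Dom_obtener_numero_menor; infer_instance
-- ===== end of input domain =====

-- One honest line: B merges A's two scans (find minimum, then count it) into a single
-- pass maintaining (minimum, count) together, resetting the count when a new minimum appears.

-- ===== PORT A =====
def obtener_numero_menor (entrada_lista : List Int) : List Int :=
  match PySem.List.pyGet? entrada_lista 0 with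
  | none => []  -- IndexError in Python on the empty list; excluded by Pre_
  | some h =>
    let menor := entrada_lista.foldl (fun m n => if n < m then n else m) h
    let contador := entrada_lista.foldl (fun c n => if n = menor then c + 1 else c) (0 : Int)
    [menor, contador]

-- ===== PORT B =====
def pvBStep (p : Int × Int) (n : Int) : Int × Int :=
  if n < p.1 then (n, 1) else if n = p.1 then (p.1, p.2 + 1) else p

def obtener_numero_menor_alt (entrada_lista : List Int) : List Int :=
  match PySem.List.pyGet? entrada_lista 0 with
  | none => []  -- IndexError in Python on the empty list; excluded by Pre_
  | some h =>
    let r := entrada_lista.foldl pvBStep (h, (0 : Int))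
    [r.1, r.2]

-- ===== PRECONDITION & SPEC =====
-- A raises IndexError on the empty list (entrada_lista[0]); Pre_ excludes exactly that.
def Pre_obtener_numero_menor (entrada_lista : List Int) : Prop := entrada_lista ≠ []
instance (entrada_lista : List Int) : Decidable (Pre_obtener_numero_menor entrada_lista) := by unfold Pre_obtener_numero_menor; infer_instance
def pvWitness_obtener_numero_menor : List Int := [3, 1, 1, 2]

def Spec_obtener_numero_menor (entrada_lista : List Int) (out : List Int) : Prop := out = obtener_numero_menor_alt entrada_lista
instance (entrada_lista : List Int) (out : List Int) : Decidable (Spec_obtener_numero_menor entrada_lista out) := by unfold Spec_obtener_numero_menor; infer_instance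

-- ===== CLAIM (what is proved, stated in full; the proofs are below) =====
def Claim_equal_obtener_numero_menor : Prop := ∀ (entrada_lista : List Int), Dom_obtener_numero_menor entrada_lista → Pre_obtener_numero_menor entrada_lista → Spec_obtener_numero_menor entrada_lista (obtener_numero_menor entrada_lista)

-- ===== LEMMAS AND PROOFS =====

def pvMinFold (l : List Int) (m : Int) : Int :=
  l.foldl (fun m n => if n < m then n else m) m

theorem pvMinFold_le (l : List Int) (m : Int) : pvMinFold l m ≤ m := by
  induction l generalizing m with
  | nil => simp [pvMinFold]
  | cons n t ih =>
    simp only [pvMinFold, List.foldl]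
    split_ifs with h
    · exact le_trans (ih n) (le_of_lt h)
    · exact ih m

theorem pvCountFold (l : List Int) (M c : Int) :
    l.foldl (fun c n => if n = M then c + 1 else c) c = c + (l.count M : Int) := by
  induction l generalizing c with
  | nil => simp
  | cons n t ih =>
    simp only [List.foldl, List.count_cons]
    by_cases h : n = M
    · simp [h, ih]; ring
    · simp [h, ih]

theorem pvCountConsInt (n : Int) (t : List Int) (M : Int) :
    ((n :: t).count M : Int) = (if M = n then (1:Int) else 0) + (t.count M : Int) := by
  rw [List.count_cons]
  by_cases h : M = n
  · simp [h]; ring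
  · simp [h, Ne.symm h]

theorem pvBInv (l : List Int) (m c : Int) :
    l.foldl pvBStep (m, c) =
      (pvMinFold l m, (if pvMinFold l m = m then c else 0) + (l.count (pvMinFold l m) : Int)) := by
  induction l generalizing m c with
  | nil => simp [pvMinFold]
  | cons n t ih =>
    have hmin : ∀ x : Int, pvMinFold (n :: t) x = pvMinFold t (if n < x then n else x) := by
      intro x; simp [pvMinFold, List.foldl]
    by_cases h1 : n < m
    · have hM : pvMinFold (n :: t) m = pvMinFold t n := by rw [hmin]; simp [h1]
      have hne : pvMinFold t n ≠ m := by
        have := pvMinFold_le t n; intro h; omega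
      simp only [List.foldl, pvBStep, if_pos h1, ih, hM]
      rw [pvCountConsInt]
      simp only [Prod.mk.injEq, true_and]
      split_ifs <;> omega
    · have hM : pvMinFold (n :: t) m = pvMinFold t m := by rw [hmin]; simp [h1]
      by_cases h2 : n = m
      · simp only [List.foldl, pvBStep, if_neg h1, if_pos h2, ih, hM]
        rw [pvCountConsInt]
        simp only [Prod.mk.injEq, true_and]
        subst h2
        split_ifs <;> omega
      · have hne : pvMinFold t m ≠ n := by
          have := pvMinFold_le t m; intro h; omega
        simp only [List.foldl, pvBStep, if_neg h1, if_neg h2, ih, hM]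
        rw [pvCountConsInt]
        simp only [Prod.mk.injEq, true_and]
        split_ifs <;> omega

-- ===== VERDICT (by name: the statement is the Claim_ definition above) =====
theorem obtener_numero_menor_spec : Claim_equal_obtener_numero_menor := by
  intro l _ hpre
  unfold Spec_obtener_numero_menor obtener_numero_menor obtener_numero_menor_alt
  match l, hpre with
  | h :: t, _ =>
    have hget : PySem.List.pyGet? (h :: t) 0 = some h := by
      simp [PySem.List.pyGet?, PySem.List.pyIdx?]
    rw [hget]
    simp only []
    rw [pvBInv]
    have hc := pvCountFold (h :: t) (pvMinFold (h :: t) h) 0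
    have hmf : (h :: t).foldl (fun m n => if n < m then n else m) h = pvMinFold (h :: t) h := rfl
    simp only [hmf, hc]
    by_cases hm : pvMinFold (h :: t) h = h <;> simp [hm]
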